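-- pv_equiv track=rewrite | github.com/yizhoucc/med_dict | audit_final.py | get_row_section
-- ===== SOURCE A (Python) =====
-- def get_row_section(content_lines, start_line, row_num):
--     """Extract section for a specific row."""
--     # Find the next row's start line
--     next_row_num = row_num + 1
--     while next_row_num < 200:
--         next_line_pattern = f"RESULTS FOR ROW {next_row_num}"
--         for i, line in enumerate(content_lines[start_line - 1:], start_line):
--             if next_line_pattern in line:
--                 return content_lines[start_line - 1:i]
--         next_row_num += 1
--
--     # If no next row found, take next 200 lines
--     return content_lines[start_line - 1:start_line + 199]
-- ===== SOURCE B (Python) =====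
-- def _min_matching(line, lo):
--     """Smallest k in [lo, 200) whose header pattern occurs in line, else None."""
--     for k in range(lo, 200):
--         if f"RESULTS FOR ROW {k}" in line:
--             return k
--     return None
--
--
-- def get_row_section(content_lines, start_line, row_num):
--     """Extract section for a specific row, in a single pass over the lines."""
--     section = content_lines[start_line - 1:]
--     best = None  # (row number, line offset) of the best header seen so far
--     for j, line in enumerate(section):
--         if "RESULTS FOR ROW " in line:
--             k = _min_matching(line, row_num + 1)
--             if k is not None and (best is None or k < best[0]):
--                 best = (k, j)
--     if best is None:
--         return content_lines[start_line - 1:start_line + 199]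
--     return content_lines[start_line - 1:start_line + best[1]]
-- ===== Notes on version B (the rewrite author's own statement) =====
-- stated objective: alternative
-- what changed: A rescans the whole line list for each of up to 200 candidate row numbers in turn; B makes a single pass over the lines, tests only the fixed header prefix per line, resolves candidate numbers only on lines containing the prefix, and keeps the (smallest row number, first offset) pair.
import Mathlib
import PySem

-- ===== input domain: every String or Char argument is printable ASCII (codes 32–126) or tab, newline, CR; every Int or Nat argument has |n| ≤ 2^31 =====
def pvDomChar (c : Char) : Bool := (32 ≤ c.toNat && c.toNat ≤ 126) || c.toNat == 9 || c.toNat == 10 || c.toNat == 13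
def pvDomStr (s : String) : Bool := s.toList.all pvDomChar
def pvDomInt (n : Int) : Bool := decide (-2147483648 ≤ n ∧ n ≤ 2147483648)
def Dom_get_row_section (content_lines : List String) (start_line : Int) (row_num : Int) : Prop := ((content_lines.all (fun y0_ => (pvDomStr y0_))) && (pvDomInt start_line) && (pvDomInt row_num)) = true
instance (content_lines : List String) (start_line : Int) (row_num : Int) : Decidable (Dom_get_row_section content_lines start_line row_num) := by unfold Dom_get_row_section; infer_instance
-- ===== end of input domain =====

-- B replaces A's rescan of all lines for each of up to 200 candidate row numbers by a
-- single pass over the lines that only examines candidate numbers on lines containing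
-- the header prefix (objective: alternative algorithm, same worst-case cost).

-- the common literal "RESULTS FOR ROW " (code-point list)
def pvPrefix : List Char := "RESULTS FOR ROW ".toList

-- ===== PORT A =====
-- inner 'for i, line in enumerate(content_lines[start_line-1:], start_line): if pattern in line: return content_lines[start_line-1:i]'
def aScan (content_lines : List String) (start_line : Int) (pat : List Char) :
    List String → Int → Option (List String)
  | [], _ => none
  | line :: rest, i =>
    if PySem.Chars.isIn pat line.toList then
      some (PySem.List.slice content_lines (some (start_line - 1)) (some i))
    else aScan content_lines start_line pat rest (i + 1)

-- 'while next_row_num < 200: …' (fuel = number of remaining iterations; exit falls to the 200-line slice)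
def aWhile (content_lines : List String) (start_line : Int) : Int → Nat → List String
  | _, 0 => PySem.List.slice content_lines (some (start_line - 1)) (some (start_line + 199))
  | next, fuel + 1 =>
    match aScan content_lines start_line (pvPrefix ++ PySem.Int.toChars next)
        (PySem.List.slice content_lines (some (start_line - 1)) none) start_line with
    | some r => r
    | none => aWhile content_lines start_line (next + 1) fuel

def get_row_section (content_lines : List String) (start_line : Int) (row_num : Int) : List String :=
  aWhile content_lines start_line (row_num + 1) (200 - (row_num + 1)).toNat

-- ===== PORT B =====
-- 'for k in range(lo, 200): if f"RESULTS FOR ROW {k}" in line: return k'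
def bMinMatching (line : List Char) : Int → Nat → Option Int
  | _, 0 => none
  | k, fuel + 1 =>
    if PySem.Chars.isIn (pvPrefix ++ PySem.Int.toChars k) line then some k
    else bMinMatching line (k + 1) fuel

-- the single pass: best = (smallest matching row number, offset of its first line)
def bFold (lo : Int) : List String → Nat → Option (Int × Nat) → Option (Int × Nat)
  | [], _, best => best
  | line :: rest, j, best =>
    let best' :=
      if PySem.Chars.isIn pvPrefix line.toList then
        match bMinMatching line.toList lo (200 - lo).toNat with
        | some k =>
          match best with
          | none => some (k, j)
          | some b => if k < b.1 then some (k, j) else best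
        | none => best
      else best
    bFold lo rest (j + 1) best'

def get_row_section_alt (content_lines : List String) (start_line : Int) (row_num : Int) : List String :=
  match bFold (row_num + 1) (PySem.List.slice content_lines (some (start_line - 1)) none) 0 none with
  | none => PySem.List.slice content_lines (some (start_line - 1)) (some (start_line + 199))
  | some b => PySem.List.slice content_lines (some (start_line - 1)) (some (start_line + (b.2 : Int)))

-- ===== PRECONDITION & SPEC =====
def Spec_get_row_section (content_lines : List String) (start_line : Int) (row_num : Int) (out : List String) : Prop := out = get_row_section_alt content_lines start_line row_num
instance (content_lines : List String) (start_line : Int) (row_num : Int) (out : List String) : Decidable (Spec_get_row_section content_lines start_line row_num out) := by unfold Spec_get_row_section; infer_instance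

-- ===== CLAIM (what is proved, stated in full; the proofs are below) =====
def Claim_equal_get_row_section : Prop := ∀ (content_lines : List String) (start_line : Int) (row_num : Int), Dom_get_row_section content_lines start_line row_num → Spec_get_row_section content_lines start_line row_num (get_row_section content_lines start_line row_num)

-- ===== LEMMAS AND PROOFS =====

-- 'line j of s is a hit for row number k' (k inside the searched range [lo, 200))
def HitIn (s : List String) (lo k : Int) (j : Nat) : Prop :=
  lo ≤ k ∧ k < 200 ∧ ∃ line, s[j]? = some line ∧
    PySem.Chars.isIn (pvPrefix ++ PySem.Int.toChars k) line.toList = true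

-- 'best' is the lexicographic minimum (smallest k, then smallest j) of the hits of s
def IsBest (s : List String) (lo : Int) : Option (Int × Nat) → Prop
  | none => ∀ k j, ¬ HitIn s lo k j
  | some kj => HitIn s lo kj.1 kj.2 ∧ ∀ k j, HitIn s lo k j → kj.1 < k ∨ (kj.1 = k ∧ kj.2 ≤ j)

-- the value both programs return, given the best (row number, offset) pair
def outOf (content_lines : List String) (start_line : Int) : Option (Int × Nat) → List String
  | none => PySem.List.slice content_lines (some (start_line - 1)) (some (start_line + 199))
  | some kj => PySem.List.slice content_lines (some (start_line - 1)) (some (start_line + (kj.2 : Int)))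

theorem aScan_eq (content_lines : List String) (start_line : Int) (pat : List Char) :
    ∀ (s : List String) (i : Int),
      aScan content_lines start_line pat s i =
        (s.findIdx? (fun line => PySem.Chars.isIn pat line.toList)).map
          (fun j : Nat => PySem.List.slice content_lines (some (start_line - 1)) (some (i + (j : Int)))) := by
  intro s
  induction s with
  | nil => intro i; rfl
  | cons line rest ih =>
    intro i
    rw [List.findIdx?_cons]
    by_cases h : PySem.Chars.isIn pat line.toList
    · simp [aScan, h]
    · simp only [aScan, h, Bool.false_eq_true, if_false]
      rw [ih (i + 1)]
      cases hfi : List.findIdx? (fun line => PySem.Chars.isIn pat line.toList) rest with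
      | none => simp
      | some j =>
        simp only [Option.map_some, Option.some.injEq]
        congr 2
        push_cast
        ring

theorem bMin_some (line : List Char) :
    ∀ (fuel : Nat) (k0 k : Int), bMinMatching line k0 fuel = some k →
      k0 ≤ k ∧ k < k0 + fuel ∧
      PySem.Chars.isIn (pvPrefix ++ PySem.Int.toChars k) line = true ∧
      ∀ k', k0 ≤ k' → k' < k → PySem.Chars.isIn (pvPrefix ++ PySem.Int.toChars k') line = false := by
  intro fuel
  induction fuel with
  | zero => intro k0 k h; simp [bMinMatching] at h
  | succ fuel ih =>
    intro k0 k h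
    by_cases hm : PySem.Chars.isIn (pvPrefix ++ PySem.Int.toChars k0) line = true
    · simp only [bMinMatching, hm, if_true, Option.some.injEq] at h
      subst h
      refine ⟨le_refl _, by push_cast; omega, hm, fun k' h1 h2 => absurd h1 (by omega)⟩
    · simp only [bMinMatching, hm] at h
      obtain ⟨h1, h2, h3, h4⟩ := ih (k0 + 1) k h
      refine ⟨by omega, by push_cast at h2 ⊢; omega, h3, fun k' hk1 hk2 => ?_⟩
      rcases eq_or_lt_of_le hk1 with rfl | hlt
      · exact Bool.eq_false_iff.mpr hm
      · exact h4 k' (by omega) hk2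

theorem bMin_none (line : List Char) :
    ∀ (fuel : Nat) (k0 : Int), bMinMatching line k0 fuel = none →
      ∀ k, k0 ≤ k → k < k0 + fuel →
        PySem.Chars.isIn (pvPrefix ++ PySem.Int.toChars k) line = false := by
  intro fuel
  induction fuel with
  | zero => intro k0 _ k h1 h2; push_cast at h2; omega
  | succ fuel ih =>
    intro k0 h k h1 h2
    by_cases hm : PySem.Chars.isIn (pvPrefix ++ PySem.Int.toChars k0) line = true
    · simp [bMinMatching, hm] at h
    · simp only [bMinMatching, hm] at h
      rcases eq_or_lt_of_le h1 with rfl | hlt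
      · exact Bool.eq_false_iff.mpr hm
      · exact ih (k0 + 1) h k (by omega) (by push_cast at h2 ⊢; omega)

theorem pvGuard_false (line : List Char) (k : Int)
    (h : PySem.Chars.isIn pvPrefix line = false) :
    PySem.Chars.isIn (pvPrefix ++ PySem.Int.toChars k) line = false := by
  rw [PySem.Chars.isIn_eq_false_iff] at h ⊢
  intro hinf
  exact h ((List.prefix_append pvPrefix (PySem.Int.toChars k)).isInfix.trans hinf)

theorem hitIn_append (done : List String) (line : String) (lo k : Int) (j : Nat) :
    HitIn (done ++ [line]) lo k j ↔
      HitIn done lo k j ∨ (j = done.length ∧ lo ≤ k ∧ k < 200 ∧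
        PySem.Chars.isIn (pvPrefix ++ PySem.Int.toChars k) line.toList = true) := by
  unfold HitIn
  rcases lt_trichotomy j done.length with hj | hj | hj
  · rw [List.getElem?_append_left hj]
    constructor
    · rintro ⟨h1, h2, l, hl, hm⟩; exact Or.inl ⟨h1, h2, l, hl, hm⟩
    · rintro (⟨h1, h2, l, hl, hm⟩ | ⟨hje, _⟩)
      · exact ⟨h1, h2, l, hl, hm⟩
      · omega
  · subst hj
    rw [List.getElem?_concat_length]
    constructor
    · rintro ⟨h1, h2, l, hl, hm⟩
      exact Or.inr ⟨rfl, h1, h2, by injection hl with e; rw [← e] at hm; exact hm⟩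
    · rintro (⟨h1, h2, l, hl, hm⟩ | ⟨_, h1, h2, hm⟩)
      · have := (List.getElem?_eq_some_iff.mp hl).1; omega
      · exact ⟨h1, h2, line, rfl, hm⟩
  · rw [List.getElem?_append_right (by omega)]
    have : [line][j - done.length]? = none := by
      apply List.getElem?_eq_none; simp; omega
    rw [this]
    constructor
    · rintro ⟨_, _, l, hl, _⟩; cases hl
    · rintro (⟨_, _, l, hl, _⟩ | ⟨hje, _⟩)
      · have := (List.getElem?_eq_some_iff.mp hl).1; omega
      · omega

-- every matching row number of 'line' in [lo, 200), when bMinMatching finds none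
theorem bMin_line_none (line : String) (lo : Int)
    (h : bMinMatching line.toList lo (200 - lo).toNat = none) :
    ∀ k, lo ≤ k → k < 200 →
      PySem.Chars.isIn (pvPrefix ++ PySem.Int.toChars k) line.toList = false := by
  intro k h1 h2
  exact bMin_none line.toList (200 - lo).toNat lo h k h1 (by omega)

-- the value bMinMatching finds is the least matching row number of 'line' in [lo, 200)
theorem bMin_line_some (line : String) (lo k0 : Int)
    (h : bMinMatching line.toList lo (200 - lo).toNat = some k0) :
    lo ≤ k0 ∧ k0 < 200 ∧
      PySem.Chars.isIn (pvPrefix ++ PySem.Int.toChars k0) line.toList = true ∧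
      ∀ k', lo ≤ k' → k' < k0 →
        PySem.Chars.isIn (pvPrefix ++ PySem.Int.toChars k') line.toList = false := by
  obtain ⟨h1, h2, h3, h4⟩ := bMin_some line.toList (200 - lo).toNat lo k0 h
  exact ⟨h1, by omega, h3, h4⟩

theorem bFold_inv (lo : Int) :
    ∀ (rest done : List String) (best : Option (Int × Nat)),
      IsBest done lo best →
      IsBest (done ++ rest) lo (bFold lo rest done.length best) := by
  intro rest
  induction rest with
  | nil => intro done best h; simpa [bFold] using h
  | cons line rest ih =>
    intro done best hbest
    have step : ∀ best', IsBest (done ++ [line]) lo best' →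
        IsBest (done ++ line :: rest) lo (bFold lo rest (done.length + 1) best') := by
      intro best' h'
      have := ih (done ++ [line]) best' h'
      simpa [List.append_assoc] using this
    show IsBest (done ++ line :: rest) lo (bFold lo (line :: rest) done.length best)
    rw [bFold]
    by_cases hg : PySem.Chars.isIn pvPrefix line.toList = true
    · cases hc : bMinMatching line.toList lo (200 - lo).toNat with
      | none =>
        have hno := bMin_line_none line lo hc
        simp only [hg, if_true]
        apply step
        cases best with
        | none =>
          intro k j hj
          rcases (hitIn_append done line lo k j).mp hj with hold | ⟨_, h1, h2, hm⟩
          · exact hbest k j hold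
          · rw [hno k h1 h2] at hm; cases hm
        | some b =>
          obtain ⟨hb1, hb2⟩ := hbest
          refine ⟨(hitIn_append done line lo b.1 b.2).mpr (Or.inl hb1), fun k j hj => ?_⟩
          rcases (hitIn_append done line lo k j).mp hj with hold | ⟨_, h1, h2, hm⟩
          · exact hb2 k j hold
          · rw [hno k h1 h2] at hm; cases hm
      | some k0 =>
        obtain ⟨hk1, hk2, hk3, hk4⟩ := bMin_line_some line lo k0 hc
        simp only [hg, if_true]
        cases best with
        | none =>
          apply step
          refine ⟨(hitIn_append done line lo k0 done.length).mpr (Or.inr ⟨rfl, hk1, hk2, hk3⟩),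
            fun k j hj => ?_⟩
          rcases (hitIn_append done line lo k j).mp hj with hold | ⟨hje, h1, h2, hm⟩
          · exact absurd hold (hbest k j)
          · subst hje
            by_cases hlt : k0 < k
            · exact Or.inl hlt
            · right
              refine ⟨?_, le_refl _⟩
              by_contra hne
              rw [hk4 k h1 (by omega)] at hm; cases hm
        | some b =>
          obtain ⟨hb1, hb2⟩ := hbest
          have hb_len : b.2 < done.length := by
            obtain ⟨_, _, l, hl, _⟩ := hb1
            exact (List.getElem?_eq_some_iff.mp hl).1
          by_cases hlt : k0 < b.1
          · simp only [hlt, if_true]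
            apply step
            refine ⟨(hitIn_append done line lo k0 done.length).mpr (Or.inr ⟨rfl, hk1, hk2, hk3⟩),
              fun k j hj => ?_⟩
            rcases (hitIn_append done line lo k j).mp hj with hold | ⟨hje, h1, h2, hm⟩
            · rcases hb2 k j hold with h | ⟨he, _⟩
              · exact Or.inl (by omega)
              · exact Or.inl (by omega)
            · subst hje
              by_cases hlt2 : k0 < k
              · exact Or.inl hlt2
              · right
                refine ⟨?_, le_refl _⟩
                by_contra hne
                rw [hk4 k h1 (by omega)] at hm; cases hm
          · simp only [hlt, if_false]
            apply step
            refine ⟨(hitIn_append done line lo b.1 b.2).mpr (Or.inl hb1), fun k j hj => ?_⟩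
            rcases (hitIn_append done line lo k j).mp hj with hold | ⟨hje, h1, h2, hm⟩
            · exact hb2 k j hold
            · subst hje
              have hk0k : k0 ≤ k := by
                by_contra hne
                rw [hk4 k h1 (by omega)] at hm; cases hm
              rcases lt_or_eq_of_le (le_of_not_gt hlt) with h | h
              · exact Or.inl (by omega)
              · rcases lt_or_eq_of_le hk0k with h2' | h2'
                · exact Or.inl (by omega)
                · exact Or.inr ⟨by omega, by omega⟩
    · simp only [hg]
      apply step
      have hno : ∀ k, PySem.Chars.isIn (pvPrefix ++ PySem.Int.toChars k) line.toList = false :=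
        fun k => pvGuard_false line.toList k (Bool.eq_false_iff.mpr hg)
      cases best with
      | none =>
        intro k j hj
        rcases (hitIn_append done line lo k j).mp hj with hold | ⟨_, _, _, hm⟩
        · exact hbest k j hold
        · rw [hno k] at hm; cases hm
      | some b =>
        obtain ⟨hb1, hb2⟩ := hbest
        refine ⟨(hitIn_append done line lo b.1 b.2).mpr (Or.inl hb1), fun k j hj => ?_⟩
        rcases (hitIn_append done line lo k j).mp hj with hold | ⟨_, _, _, hm⟩
        · exact hb2 k j hold
        · rw [hno k] at hm; cases hm

theorem aWhile_spec (content_lines : List String) (start_line lo : Int)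
    (best : Option (Int × Nat))
    (hbest : IsBest (PySem.List.slice content_lines (some (start_line - 1)) none) lo best) :
    ∀ (fuel : Nat) (next : Int), lo ≤ next →
      (next + (fuel : Int) = 200 ∨ (200 ≤ next ∧ fuel = 0)) →
      (∀ k, lo ≤ k → k < next → ∀ j, ¬ HitIn (PySem.List.slice content_lines (some (start_line - 1)) none) lo k j) →
      aWhile content_lines start_line next fuel = outOf content_lines start_line best := by
  intro fuel
  induction fuel with
  | zero =>
    intro next hlo hdis hinv
    have h200 : 200 ≤ next := by
      rcases hdis with h | h
      · push_cast at h; omega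
      · exact h.1
    revert hbest
    cases best with
    | none => intro _; rfl
    | some kj =>
      intro hbest
      obtain ⟨⟨h1, h2, hhit⟩, _⟩ := hbest
      exact absurd ⟨h1, h2, hhit⟩ (hinv kj.1 h1 (by omega) kj.2)
  | succ fuel ih =>
    intro next hlo hdis hinv
    have hnext : next + (fuel : Int) + 1 = 200 := by
      rcases hdis with h | h
      · push_cast at h; omega
      · omega
    rw [aWhile, aScan_eq]
    cases hfi : List.findIdx?
        (fun line => PySem.Chars.isIn (pvPrefix ++ PySem.Int.toChars next) line.toList)
        (PySem.List.slice content_lines (some (start_line - 1)) none) with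
    | none =>
      simp only [Option.map_none]
      rw [List.findIdx?_eq_none_iff] at hfi
      apply ih (next + 1) (by omega) (by left; omega)
      intro k h1 h2 j hj
      by_cases hk : k < next
      · exact hinv k h1 hk j hj
      · have hkeq : k = next := by omega
        subst hkeq
        obtain ⟨_, _, line, hline, hm⟩ := hj
        have : line ∈ PySem.List.slice content_lines (some (start_line - 1)) none :=
          List.mem_of_getElem? hline
        rw [hfi line this] at hm; cases hm
    | some j0 =>
      simp only [Option.map_some]
      obtain ⟨hlen, hp, hmin⟩ := List.findIdx?_eq_some_iff_getElem.mp hfi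
      have hhit0 : HitIn (PySem.List.slice content_lines (some (start_line - 1)) none) lo next j0 :=
        ⟨hlo, by omega, _, List.getElem?_eq_some_iff.mpr ⟨hlen, rfl⟩, hp⟩
      revert hbest
      cases best with
      | none => intro hbest; exact absurd hhit0 (hbest next j0)
      | some kj =>
        intro hbest
        obtain ⟨hhitb, hminb⟩ := hbest
        have hk_ge : ¬ kj.1 < next := fun h =>
          absurd hhitb (hinv kj.1 hhitb.1 h kj.2)
        have hkeq : kj.1 = next ∧ kj.2 ≤ j0 := by
          rcases hminb next j0 hhit0 with h | h
          · omega
          · exact h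
        obtain ⟨hline2, hj2⟩ := hkeq
        have hj_eq : kj.2 = j0 := by
          obtain ⟨_, _, line, hline, hm⟩ := hhitb
          rw [hline2] at hm
          by_contra hne
          have hlt : kj.2 < j0 := by omega
          obtain ⟨hjlen, hjeq⟩ := List.getElem?_eq_some_iff.mp hline
          subst hjeq
          exact absurd hm (by simpa using hmin kj.2 hlt)
        show _ = outOf content_lines start_line (some kj)
        rw [outOf, hj_eq]

-- ===== VERDICT (by name: the statement is the Claim_ definition above) =====
theorem get_row_section_spec : Claim_equal_get_row_section := by
  intro content_lines start_line row_num _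
  unfold Spec_get_row_section
  set lo := row_num + 1 with hlo_def
  set s := PySem.List.slice content_lines (some (start_line - 1)) none with hs_def
  have hbase : IsBest ([] : List String) lo none := by
    intro k j hj
    obtain ⟨_, _, line, hline, _⟩ := hj
    simp at hline
  have hbest : IsBest s lo (bFold lo s 0 none) := by
    have := bFold_inv lo s [] none hbase
    simpa using this
  have hmain := aWhile_spec content_lines start_line lo (bFold lo s 0 none) hbest
    (200 - lo).toNat lo (le_refl _)
    (by rcases le_or_gt 200 lo with h | h
        · right; exact ⟨h, by omega⟩
        · left; rw [Int.toNat_of_nonneg (by omega)]; omega)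
    (fun k h1 h2 j hj => absurd (lt_of_le_of_lt h1 h2) (lt_irrefl lo))
  unfold get_row_section get_row_section_alt
  rw [← hlo_def, ← hs_def, hmain]
  cases hb : bFold lo s 0 none with
  | none => rw [outOf]
  | some b => rw [outOf]
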